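-- pv_equiv track=rewrite | github.com/jakobkarlstrand/aoc-22 | day18/src.py | coor_is_not_trapped
-- ===== SOURCE A (Python) =====
-- def coor_is_not_trapped(coordinates,visited,current,MAX_VALS):
--     min_x,max_x,min_y,max_y,min_z,max_z = MAX_VALS
--     x,y,z = current
--     neigbors = [c for c in [(x+1,y,z),(x-1,y,z),(x,y+1,z),(x,y-1,z),(x,y,z+1),(x,y,z-1)] if c not in coordinates and c not in visited]
--     visited.add(current)
--     if x < min_x or x > max_x or y < min_y or y > max_y or z < min_z or z > max_z:
--         return True
--
--     if len(neigbors) == 0: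
--         return False
--     n_not_trapped = 0
--
--     for coor in neigbors:
--         if coor_is_not_trapped(coordinates,visited,coor,MAX_VALS):
--             return True
--
--     return False
-- ===== SOURCE B (Python) =====
-- # Iterative DFS with an explicit stack of neighbor iterators instead of A's recursion.
-- # Same return value and the same in-place mutation of `visited` (entry-time add, same DFS order).
-- def coor_is_not_trapped(coordinates, visited, current, MAX_VALS):
--     min_x, max_x, min_y, max_y, min_z, max_z = MAX_VALS
--
--     def enter(c):
--         # neighbor list computed before marking, exactly as in the recursive version
--         x, y, z = c
--         ns = [n for n in ((x + 1, y, z), (x - 1, y, z), (x, y + 1, z),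
--                           (x, y - 1, z), (x, y, z + 1), (x, y, z - 1))
--               if n not in coordinates and n not in visited]
--         visited.add(c)
--         if x < min_x or x > max_x or y < min_y or y > max_y or z < min_z or z > max_z:
--             return None  # escaped the bounding box
--         return ns
--
--     ns = enter(current)
--     if ns is None:
--         return True
--     stack = [iter(ns)]
--     while stack:
--         nxt = next(stack[-1], None)
--         if nxt is None:
--             stack.pop()
--             continue
--         ns2 = enter(nxt)
--         if ns2 is None:
--             return True
--         stack.append(iter(ns2))
--     return False
-- ===== Notes on version B (the rewrite author's own statement) =====
-- stated objective: alternative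
-- what changed: A's recursive depth-first flood fill is replaced by an iterative DFS that drives an explicit stack of neighbor iterators, entering each node (filter neighbors, mark visited, bounds check) in the same left-to-right order, so recursion disappears while the return value and the in-place growth of `visited` are identical.
import Mathlib
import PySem

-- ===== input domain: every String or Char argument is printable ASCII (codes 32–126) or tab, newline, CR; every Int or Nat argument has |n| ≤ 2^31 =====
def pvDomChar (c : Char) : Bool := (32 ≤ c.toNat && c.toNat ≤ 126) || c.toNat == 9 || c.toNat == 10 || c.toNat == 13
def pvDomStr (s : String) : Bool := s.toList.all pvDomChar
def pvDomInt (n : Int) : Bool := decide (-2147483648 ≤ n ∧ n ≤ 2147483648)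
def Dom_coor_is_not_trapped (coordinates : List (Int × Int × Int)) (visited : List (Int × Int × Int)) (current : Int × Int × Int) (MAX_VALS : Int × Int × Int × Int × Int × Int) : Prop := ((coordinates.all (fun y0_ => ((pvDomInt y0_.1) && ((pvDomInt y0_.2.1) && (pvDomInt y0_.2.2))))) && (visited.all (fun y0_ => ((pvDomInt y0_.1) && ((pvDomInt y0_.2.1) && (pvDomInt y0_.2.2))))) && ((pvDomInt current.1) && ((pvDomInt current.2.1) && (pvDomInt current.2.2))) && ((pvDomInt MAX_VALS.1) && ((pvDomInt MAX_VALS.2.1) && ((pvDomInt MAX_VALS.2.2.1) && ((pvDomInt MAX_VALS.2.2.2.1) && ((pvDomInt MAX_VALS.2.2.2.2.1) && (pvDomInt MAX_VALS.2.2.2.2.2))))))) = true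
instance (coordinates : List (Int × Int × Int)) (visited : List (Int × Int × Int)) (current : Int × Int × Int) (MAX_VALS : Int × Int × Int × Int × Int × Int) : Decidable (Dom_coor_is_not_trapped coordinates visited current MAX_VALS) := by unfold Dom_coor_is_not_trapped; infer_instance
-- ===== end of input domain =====

-- B replaces A's recursive DFS by an iterative DFS over an explicit stack of neighbor lists
-- (same return value and the same in-place growth of the Python `visited` set; the equivalence
-- proved here is about the return value, `visited` is modelled as explicitly threaded state).
-- Both ports carry a Nat depth budget as a pure totalization guard (Lean needs termination);
-- the top-level budget exceeds the maximal possible DFS depth, so the guard branch mirrors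
-- nothing Python does and is never reached on actual runs.

-- shared context helpers (the same expressions appear verbatim in both Pythons)
def pvNbrs (c : Int × Int × Int) : List (Int × Int × Int) :=
  [(c.1 + 1, c.2.1, c.2.2), (c.1 - 1, c.2.1, c.2.2),
   (c.1, c.2.1 + 1, c.2.2), (c.1, c.2.1 - 1, c.2.2),
   (c.1, c.2.1, c.2.2 + 1), (c.1, c.2.1, c.2.2 - 1)]

def pvFilterNbrs (coordinates : List (Int × Int × Int)) (v : PySem.Set (Int × Int × Int))
    (c : Int × Int × Int) : List (Int × Int × Int) :=
  (pvNbrs c).filter (fun n => !(coordinates.contains n) && !(PySem.Set.contains v n))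

def pvOOB (MAX_VALS : Int × Int × Int × Int × Int × Int) (c : Int × Int × Int) : Bool :=
  decide (c.1 < MAX_VALS.1 ∨ c.1 > MAX_VALS.2.1 ∨ c.2.1 < MAX_VALS.2.2.1 ∨
          c.2.1 > MAX_VALS.2.2.2.1 ∨ c.2.2 < MAX_VALS.2.2.2.2.1 ∨ c.2.2 > MAX_VALS.2.2.2.2.2)

-- depth budget: strictly more than the box volume (an upper bound on DFS depth)
def pvFuel (MAX_VALS : Int × Int × Int × Int × Int × Int) : Nat :=
  ((MAX_VALS.2.1 - MAX_VALS.1 + 1) * (MAX_VALS.2.2.2.1 - MAX_VALS.2.2.1 + 1) *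
   (MAX_VALS.2.2.2.2.2 - MAX_VALS.2.2.2.2.1 + 1)).toNat + 2

-- ===== PORT A =====  (recursive DFS; the `for coor in neigbors` loop is pvLoopA)
def pvLoopA (go : PySem.Set (Int × Int × Int) → (Int × Int × Int) → Bool × PySem.Set (Int × Int × Int)) :
    PySem.Set (Int × Int × Int) → List (Int × Int × Int) → Bool × PySem.Set (Int × Int × Int)
  | v, [] => (false, v)
  | v, n :: rest =>
    let r := go v n
    if r.1 then (true, r.2) else pvLoopA go r.2 rest

def pvGoA (coordinates : List (Int × Int × Int)) (MAX_VALS : Int × Int × Int × Int × Int × Int)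
    (fuel : Nat) (v : PySem.Set (Int × Int × Int)) (c : Int × Int × Int) :
    Bool × PySem.Set (Int × Int × Int) :=
  match fuel with
  | 0 => (false, v)  -- totalization guard, never reached from the top-level budget
  | f + 1 =>
    let ns := pvFilterNbrs coordinates v c
    let v' := PySem.Set.add v c
    if pvOOB MAX_VALS c then (true, v')
    else if ns.length = 0 then (false, v')
    else pvLoopA (pvGoA coordinates MAX_VALS f) v' ns
termination_by fuel

def coor_is_not_trapped (coordinates : List (Int × Int × Int)) (visited : List (Int × Int × Int)) (current : Int × Int × Int) (MAX_VALS : Int × Int × Int × Int × Int × Int) : Bool :=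
  (pvGoA coordinates MAX_VALS (pvFuel MAX_VALS + 1) (PySem.Set.ofList visited) current).1

-- ===== PORT B =====  (iterative DFS: a stack of frames, each frame = (budget, remaining neighbors))
def pvMeasB (stk : List (Nat × List (Int × Int × Int))) : Nat :=
  2 * stk.foldr (fun p acc => p.2.length * 7 ^ p.1 + acc) 0 + stk.length

def pvStepB (coordinates : List (Int × Int × Int)) (MAX_VALS : Int × Int × Int × Int × Int × Int)
    (v : PySem.Set (Int × Int × Int)) (stk : List (Nat × List (Int × Int × Int))) : Bool :=
  match stk with
  | [] => false
  | (_, []) :: stk' => pvStepB coordinates MAX_VALS v stk'          -- frame exhausted: pop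
  | (0, _ :: rest) :: stk' => pvStepB coordinates MAX_VALS v ((0, rest) :: stk')  -- guard only
  | (g + 1, n :: rest) :: stk' =>                                   -- enter next neighbor n
    let ns := pvFilterNbrs coordinates v n
    let v' := PySem.Set.add v n
    if pvOOB MAX_VALS n then true
    else pvStepB coordinates MAX_VALS v' ((g, ns) :: (g + 1, rest) :: stk')
termination_by pvMeasB stk
decreasing_by
  all_goals simp only [pvMeasB, List.foldr_cons, List.length_cons, pow_succ]
  · simp
  · simp
  · generalize List.foldr (fun (p : Nat × List (Int × Int × Int)) acc => p.2.length * 7 ^ p.1 + acc) 0 stk' = t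
    have h6 : (pvFilterNbrs coordinates v n).length ≤ 6 :=
      le_trans (List.length_filter_le _ _) (by simp [pvNbrs])
    have h7 : 1 ≤ 7 ^ g := Nat.one_le_pow _ _ (by omega)
    nlinarith [Nat.mul_le_mul_right (7 ^ g) h6]

def coor_is_not_trapped_alt (coordinates : List (Int × Int × Int)) (visited : List (Int × Int × Int)) (current : Int × Int × Int) (MAX_VALS : Int × Int × Int × Int × Int × Int) : Bool :=
  let v := PySem.Set.ofList visited
  let ns := pvFilterNbrs coordinates v current
  let v' := PySem.Set.add v current
  if pvOOB MAX_VALS current then true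
  else pvStepB coordinates MAX_VALS v' [(pvFuel MAX_VALS, ns)]

-- ===== PRECONDITION & SPEC =====
def Spec_coor_is_not_trapped (coordinates : List (Int × Int × Int)) (visited : List (Int × Int × Int)) (current : Int × Int × Int) (MAX_VALS : Int × Int × Int × Int × Int × Int) (out : Bool) : Prop := out = coor_is_not_trapped_alt coordinates visited current MAX_VALS
instance (coordinates : List (Int × Int × Int)) (visited : List (Int × Int × Int)) (current : Int × Int × Int) (MAX_VALS : Int × Int × Int × Int × Int × Int) (out : Bool) : Decidable (Spec_coor_is_not_trapped coordinates visited current MAX_VALS out) := by unfold Spec_coor_is_not_trapped; infer_instance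

-- ===== CLAIM (what is proved, stated in full; the proofs are below) =====
def Claim_equal_coor_is_not_trapped : Prop := ∀ (coordinates : List (Int × Int × Int)) (visited : List (Int × Int × Int)) (current : Int × Int × Int) (MAX_VALS : Int × Int × Int × Int × Int × Int), Dom_coor_is_not_trapped coordinates visited current MAX_VALS → Spec_coor_is_not_trapped coordinates visited current MAX_VALS (coor_is_not_trapped coordinates visited current MAX_VALS)

-- ===== LEMMAS AND PROOFS =====

-- one-step unfolding of A's recursion at positive budget
theorem pvGoA_succ (C : List (Int × Int × Int)) (M : Int × Int × Int × Int × Int × Int)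
    (f : Nat) (v : PySem.Set (Int × Int × Int)) (c : Int × Int × Int) :
    pvGoA C M (f + 1) v c =
      (let ns := pvFilterNbrs C v c
       let v' := PySem.Set.add v c
       if pvOOB M c then (true, v')
       else if ns.length = 0 then (false, v')
       else pvLoopA (pvGoA C M f) v' ns) := by
  rw [pvGoA]

-- the stack machine run on a frame (f, ns) over stk is A's loop on ns at budget f, then the rest
theorem pvBridge (C : List (Int × Int × Int)) (M : Int × Int × Int × Int × Int × Int) :
    ∀ (f : Nat) (ns : List (Int × Int × Int)) (v : PySem.Set (Int × Int × Int))
      (stk : List (Nat × List (Int × Int × Int))),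
      pvStepB C M v ((f, ns) :: stk) =
        (let r := pvLoopA (pvGoA C M f) v ns;
         if r.1 then true else pvStepB C M r.2 stk) := by
  intro f
  induction f with
  | zero =>
    intro ns
    induction ns with
    | nil => intro v stk; simp [pvStepB, pvLoopA]
    | cons n rest ih =>
      intro v stk
      rw [show pvStepB C M v ((0, n :: rest) :: stk) = pvStepB C M v ((0, rest) :: stk) from by
        rw [pvStepB]]
      rw [ih]
      simp [pvLoopA, pvGoA]
  | succ g ihg =>
    intro ns
    induction ns with
    | nil => intro v stk; simp [pvStepB, pvLoopA]
    | cons n rest ih =>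
      intro v stk
      rw [show pvStepB C M v ((g + 1, n :: rest) :: stk) =
            (if pvOOB M n then true
             else pvStepB C M (PySem.Set.add v n)
               ((g, pvFilterNbrs C v n) :: (g + 1, rest) :: stk)) from by rw [pvStepB]]
      simp only [pvLoopA, pvGoA_succ]
      by_cases hob : pvOOB M n = true
      · simp [hob]
      · simp only [hob, if_false, Bool.false_eq_true]
        rw [ihg]
        by_cases hlen : (pvFilterNbrs C v n).length = 0
        · rw [List.length_eq_zero_iff] at hlen
          simp only [hlen, pvLoopA, List.length_nil, if_true, Bool.false_eq_true, if_false]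
          rw [ih]
        · simp only [if_neg hlen]
          cases hr : (pvLoopA (pvGoA C M g) (PySem.Set.add v n) (pvFilterNbrs C v n)).1
          · simp only [Bool.false_eq_true, if_false]
            rw [ih]
          · simp

-- ===== VERDICT (by name: the statement is the Claim_ definition above) =====
theorem coor_is_not_trapped_spec : Claim_equal_coor_is_not_trapped := by
  intro coordinates visited current MAX_VALS _
  unfold Spec_coor_is_not_trapped coor_is_not_trapped coor_is_not_trapped_alt
  rw [pvGoA_succ]
  simp only []
  by_cases hob : pvOOB MAX_VALS current = true
  · simp [hob]
  · simp only [hob, if_false, Bool.false_eq_true]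
    rw [pvBridge]
    by_cases hlen : (pvFilterNbrs coordinates (PySem.Set.ofList visited) current).length = 0
    · rw [List.length_eq_zero_iff] at hlen
      simp [hlen, pvLoopA, pvStepB]
    · simp only [if_neg hlen]
      cases hr : (pvLoopA (pvGoA coordinates MAX_VALS (pvFuel MAX_VALS))
          (PySem.Set.add (PySem.Set.ofList visited) current)
          (pvFilterNbrs coordinates (PySem.Set.ofList visited) current)).1 <;>
        simp [pvStepB]
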